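-- pv_equiv track=rewrite | github.com/F0rgottten/timus_labs | 1769.py | find_missing_number
-- ===== SOURCE A (Python) =====
-- def prefix_function(s):
--     n = len(s)
--     pi = [0] * n
--     for i in range(1, n):
--         j = pi[i - 1]
--         while j > 0 and s[i] != s[j]:
--             j = pi[j - 1]
--         if s[i] == s[j]:
--             j += 1
--         pi[i] = j
--     return pi
--
-- def find_missing_number(s):
--     n = len(s)
--     pi = prefix_function(s)
--     for i in range(n):
--         k = pi[i]
--         if k > 0 and (i + 1) % (i + 1 - k) == 0:
--             m = (i + 1) // (i + 1 - k)
--             if str(m) not in s: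
--                 return m
--     return n
-- ===== SOURCE B (Python) =====
-- def find_missing_number(s):
--     n = len(s)
--     # smallest period of the prefix of length L, maintained incrementally:
--     # it never decreases as L grows, so p only moves forward.
--     p = 1
--     ok = True  # is p a period of the prefix of length L-1 / L (after update)?
--     for L in range(2, n + 1):
--         ok = ok and s[L - 1] == s[L - 1 - p]
--         while not ok:
--             p += 1
--             ok = all(s[j] == s[j - p] for j in range(p, L))
--         if p < L and L % p == 0:
--             m = L // p
--             if str(m) not in s:
--                 return m
--     return n
-- ===== Notes on version B (the rewrite author's own statement) =====
-- stated objective: alternative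
-- what changed: B drops the prefix-function (KMP) pass and its pi array entirely: it maintains the smallest period p of the growing prefix directly (p never decreases as the prefix grows, so it is extended by one character comparison per step and rechecked by direct comparison only when it moves), and tests divisibility and substring membership at that smallest period.
import Mathlib
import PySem

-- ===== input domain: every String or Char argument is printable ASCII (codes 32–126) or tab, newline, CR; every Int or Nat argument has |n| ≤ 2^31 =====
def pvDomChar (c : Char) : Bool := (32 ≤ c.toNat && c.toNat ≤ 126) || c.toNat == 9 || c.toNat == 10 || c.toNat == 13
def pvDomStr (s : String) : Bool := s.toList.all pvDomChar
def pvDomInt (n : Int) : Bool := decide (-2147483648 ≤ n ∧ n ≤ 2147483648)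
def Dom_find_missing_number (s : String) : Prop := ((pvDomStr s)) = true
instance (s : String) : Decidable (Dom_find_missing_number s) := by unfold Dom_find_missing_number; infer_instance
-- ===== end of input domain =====

-- B drops the prefix-function (KMP) machinery entirely: it maintains the smallest period of the
-- growing prefix directly (monotone, rechecked by character comparison); not claimed faster.

-- ===== PORT A =====

-- the `while j > 0 and s[i] != s[j]: j = pi[j-1]` loop of prefix_function
-- (fuel only makes the recursion total; `cs.length` iterations always suffice)
def borderChase (cs : List Char) (pi : List Int) (c : Char) : Nat → Int → Int
  | 0, j => j
  | fuel + 1, j =>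
    if 0 < j ∧ c ≠ PySem.List.pyGetD cs j ' ' then
      borderChase cs pi c fuel (PySem.List.pyGetD pi (j - 1) 0)
    else j

-- body of `for i in range(1, n)` in prefix_function
def stepA (cs : List Char) (pi : List Int) (i : Int) : List Int :=
  let j0 := PySem.List.pyGetD pi (i - 1) 0
  let j1 := borderChase cs pi (PySem.List.pyGetD cs i ' ') cs.length j0
  let j2 := if PySem.List.pyGetD cs i ' ' = PySem.List.pyGetD cs j1 ' ' then j1 + 1 else j1
  PySem.List.pySetD pi i j2

def prefix_function (s : String) : List Int :=
  let cs := s.toList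
  let n := cs.length
  (PySem.List.pyRange 1 (n : Int) 1).foldl (stepA cs) (List.replicate n 0)

-- `for i in range(n): …` scan with early return
def fmnScan (s : String) (pi : List Int) (n : Int) : List Int → Int
  | [] => n
  | i :: rest =>
    let k := PySem.List.pyGetD pi i 0
    if 0 < k ∧ PySem.Int.mod (i + 1) (i + 1 - k) = 0 then
      let m := PySem.Int.floordiv (i + 1) (i + 1 - k)
      if PySem.Str.isIn (PySem.Int.toStr m) s = false then m
      else fmnScan s pi n rest
    else fmnScan s pi n rest

def find_missing_number (s : String) : Int :=
  let n := s.toList.length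
  let pi := prefix_function s
  fmnScan s pi (n : Int) (PySem.List.pyRange 0 (n : Int) 1)

-- ===== PORT B =====

-- `all(s[j] == s[j - p] for j in range(p, L))`
def periodTest (cs : List Char) (p L : Int) : Bool :=
  (PySem.List.pyRange p L 1).all
    (fun j => PySem.List.pyGetD cs j ' ' == PySem.List.pyGetD cs (j - p) ' ')

-- `while not ok: p += 1; ok = all(...)` (fuel only makes the loop total; `L - p` steps suffice)
def whileB (cs : List Char) (L : Int) : Nat -> Int -> Bool -> Int × Bool
  | 0, p, ok => (p, ok)
  | f + 1, p, ok =>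
    if ok = false then whileB cs L f (p + 1) (periodTest cs (p + 1) L)
    else (p, ok)

-- `for L in range(2, n + 1): ...` carrying the state (p, ok), with early return
def outerB (s : String) (cs : List Char) (n : Int) : Int -> Bool -> List Int -> Int
  | _, _, [] => n
  | p, ok, L :: rest =>
    let ok1 := ok && (PySem.List.pyGetD cs (L - 1) ' ' == PySem.List.pyGetD cs (L - 1 - p) ' ')
    let st := whileB cs L (L - p).toNat p ok1
    if st.1 < L ∧ PySem.Int.mod L st.1 = 0 then
      let m := PySem.Int.floordiv L st.1
      if PySem.Str.isIn (PySem.Int.toStr m) s = false then m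
      else outerB s cs n st.1 st.2 rest
    else outerB s cs n st.1 st.2 rest

def find_missing_number_alt (s : String) : Int :=
  let cs := s.toList
  let n := (cs.length : Int)
  outerB s cs n 1 true (PySem.List.pyRange 2 (n + 1) 1)

-- ===== PRECONDITION & SPEC =====
def Spec_find_missing_number (s : String) (out : Int) : Prop := out = find_missing_number_alt s
instance (s : String) (out : Int) : Decidable (Spec_find_missing_number s out) := by unfold Spec_find_missing_number; infer_instance

-- ===== CLAIM (what is proved, stated in full; the proofs are below) =====
def Claim_equal_find_missing_number : Prop := ∀ (s : String), Dom_find_missing_number s → Spec_find_missing_number s (find_missing_number s)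

-- ===== LEMMAS AND PROOFS =====

-- k is a border of the prefix of length t: prefix of length k = suffix of length k of that prefix
def borderB (cs : List Char) (t k : Nat) : Bool :=
  decide (k < t) && (List.range k).all (fun x => cs.getD x ' ' == cs.getD (t - k + x) ' ')

-- length of the longest border of the prefix of length t
def M (cs : List Char) (t : Nat) : Nat :=
  Nat.findGreatest (fun k => borderB cs t k = true) (t - 1)

lemma borderB_iff (cs : List Char) (t k : Nat) :
    borderB cs t k = true ↔ k < t ∧ ∀ x < k, cs.getD x ' ' = cs.getD (t - k + x) ' ' := by
  simp [borderB]

lemma border_zero (cs : List Char) (t : Nat) (h : 1 ≤ t) : borderB cs t 0 = true := by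
  rw [borderB_iff]; exact ⟨h, by omega⟩

lemma border_lt (cs : List Char) {t k : Nat} (h : borderB cs t k = true) : k < t :=
  ((borderB_iff cs t k).mp h).1

lemma border_trans (cs : List Char) {t j k : Nat} (hj : borderB cs t j = true)
    (hk : borderB cs j k = true) : borderB cs t k = true := by
  rw [borderB_iff] at *
  obtain ⟨hjt, hjp⟩ := hj
  obtain ⟨hkj, hkp⟩ := hk
  refine ⟨by omega, fun x hx => ?_⟩
  have h1 := hkp x hx
  have h2 := hjp (j - k + x) (by omega)
  have h3 : t - j + (j - k + x) = t - k + x := by omega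
  rw [h3] at h2
  rw [h1] at *
  exact h2

lemma border_down (cs : List Char) {t j k : Nat} (hj : borderB cs t j = true)
    (hk : borderB cs t k = true) (hkj : k < j) : borderB cs j k = true := by
  rw [borderB_iff] at *
  obtain ⟨hjt, hjp⟩ := hj
  obtain ⟨hkt, hkp⟩ := hk
  refine ⟨hkj, fun x hx => ?_⟩
  have h1 := hkp x hx
  have h2 := hjp (j - k + x) (by omega)
  have h3 : t - j + (j - k + x) = t - k + x := by omega
  rw [h3] at h2
  rw [h1, ← h2]

lemma border_succ (cs : List Char) (t k : Nat) :
    borderB cs (t + 1) (k + 1) = true ↔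
      borderB cs t k = true ∧ cs.getD t ' ' = cs.getD k ' ' := by
  rw [borderB_iff, borderB_iff]
  constructor
  · rintro ⟨hlt, hp⟩
    have hk := hp k (by omega)
    have hkk : t + 1 - (k + 1) + k = t := by omega
    rw [hkk] at hk
    refine ⟨⟨by omega, fun x hx => ?_⟩, hk.symm⟩
    have := hp x (by omega)
    have h3 : t + 1 - (k + 1) + x = t - k + x := by omega
    rwa [h3] at this
  · rintro ⟨⟨hlt, hp⟩, hc⟩
    refine ⟨by omega, fun x hx => ?_⟩
    rcases Nat.lt_or_ge x k with h | h
    · have := hp x h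
      have h3 : t + 1 - (k + 1) + x = t - k + x := by omega
      rwa [h3]
    · have hxk : x = k := by omega
      have h3 : t + 1 - (k + 1) + x = t := by omega
      rw [h3, hxk]
      exact hc.symm
lemma M_border (cs : List Char) (t : Nat) (h : 1 ≤ t) : borderB cs t (M cs t) = true :=
  Nat.findGreatest_spec (P := fun k => borderB cs t k = true) (Nat.zero_le _) (border_zero cs t h)

lemma M_lt (cs : List Char) (t : Nat) (h : 1 ≤ t) : M cs t < t := by
  have := Nat.findGreatest_le (P := fun k => borderB cs t k = true) (t - 1)
  unfold M; omega

lemma M_greatest (cs : List Char) {t k : Nat} (hk : borderB cs t k = true) : k ≤ M cs t := by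
  by_contra h
  unfold M at h
  have h2 : Nat.findGreatest (fun k => borderB cs t k = true) (t - 1) < k := by omega
  exact absurd hk (Nat.findGreatest_is_greatest h2 (by have := border_lt cs hk; omega))

lemma M_one (cs : List Char) : M cs 1 = 0 := by
  unfold M; simp

-- invariant carried through the chase loop
def ChaseInv (cs : List Char) (t j : Nat) : Prop :=
  borderB cs t j = true ∧
    ∀ k, borderB cs t k = true → j < k → cs.getD t ' ' ≠ cs.getD k ' '

lemma chase_M (cs : List Char) (t : Nat) (ht : 1 ≤ t) (pi : List Int)
    (hlen : t ≤ pi.length)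
    (hpi : ∀ u (hu : u < pi.length), pi[u] = (M cs (u + 1) : Int)) :
    ∀ (fuel j : Nat), j < fuel → ChaseInv cs t j →
      ∃ jf : Nat, borderChase cs pi (PySem.List.pyGetD cs (t : Int) ' ') fuel (j : Int) = (jf : Int)
        ∧ ChaseInv cs t jf
        ∧ (jf = 0 ∨ cs.getD t ' ' = cs.getD jf ' ') := by
  intro fuel
  induction fuel with
  | zero => intro j hj _; omega
  | succ f ih =>
    intro j hj hInv
    have hjt : j < t := border_lt cs hInv.1
    simp only [borderChase]
    by_cases hcond : 0 < (j : Int) ∧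
        PySem.List.pyGetD cs (t : Int) ' ' ≠ PySem.List.pyGetD cs (j : Int) ' ' 
    · rw [if_pos hcond]
      have hj0 : 0 < j := by exact_mod_cast hcond.1
      have hidx : j - 1 < pi.length := by omega
      have hgetpi : PySem.List.pyGetD pi ((j : Int) - 1) 0 = (M cs j : Int) := by
        have hcast : (j : Int) - 1 = ((j - 1 : Nat) : Int) := by omega
        have e1 : j - 1 + 1 = j := by omega
        rw [hcast, PySem.List.pyGetD_natCast, List.getD_eq_getElem _ _ hidx, hpi (j - 1) hidx, e1]
      rw [hgetpi]
      have hMj : M cs j < j := M_lt cs j hj0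
      have hmis : cs.getD t ' ' ≠ cs.getD j ' ' := by
        have h1 : PySem.List.pyGetD cs (t : Int) ' ' = cs.getD t ' ' := by
          rw [PySem.List.pyGetD_natCast]
        have h2 : PySem.List.pyGetD cs (j : Int) ' ' = cs.getD j ' ' := by
          rw [PySem.List.pyGetD_natCast]
        rw [h1, h2] at hcond
        exact hcond.2
      have hInv' : ChaseInv cs t (M cs j) := by
        constructor
        · rcases Nat.eq_zero_or_pos (M cs j) with h0 | hpos
          · rw [h0]; exact border_zero cs t ht
          · exact border_trans cs hInv.1 (M_border cs j hj0)
        · intro k hk hgt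
          rcases Nat.lt_trichotomy k j with h | h | h
          · exfalso
            have := M_greatest cs (border_down cs hInv.1 hk h)
            omega
          · subst h; exact hmis
          · exact hInv.2 k hk h
      exact ih (M cs j) (by omega) hInv'
    · rw [if_neg hcond]
      refine ⟨j, rfl, hInv, ?_⟩
      push Not at hcond
      rcases Nat.eq_zero_or_pos j with h0 | hpos
      · exact Or.inl h0
      · right
        have := hcond (by exact_mod_cast hpos)
        rw [PySem.List.pyGetD_natCast, PySem.List.pyGetD_natCast] at this
        exact this

-- the j computed for index i from the current prefix array
def jstep (cs : List Char) (pi : List Int) (i : Int) : Int :=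
  let j0 := PySem.List.pyGetD pi (i - 1) 0
  let j1 := borderChase cs pi (PySem.List.pyGetD cs i ' ') cs.length j0
  if PySem.List.pyGetD cs i ' ' = PySem.List.pyGetD cs j1 ' ' then j1 + 1 else j1

lemma jstep_M (cs : List Char) (pi : List Int) (t : Nat) (h1 : 1 ≤ t) (ht : t < cs.length)
    (hlen : t ≤ pi.length)
    (hpi : ∀ u (hu : u < pi.length), pi[u] = (M cs (u + 1) : Int)) :
    jstep cs pi (t : Int) = (M cs (t + 1) : Int) := by
  have hget0 : PySem.List.pyGetD pi ((t : Int) - 1) 0 = (M cs t : Int) := by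
    have hidx : t - 1 < pi.length := by omega
    have hcast : (t : Int) - 1 = ((t - 1 : Nat) : Int) := by omega
    have e1 : t - 1 + 1 = t := by omega
    rw [hcast, PySem.List.pyGetD_natCast, List.getD_eq_getElem _ _ hidx, hpi (t - 1) hidx, e1]
  have hInv0 : ChaseInv cs t (M cs t) := by
    refine ⟨M_border cs t h1, fun k hk hgt => absurd (M_greatest cs hk) (by omega)⟩
  obtain ⟨jf, hrun, hInv, hflag⟩ :=
    chase_M cs t h1 pi hlen hpi cs.length (M cs t) (by have := M_lt cs t h1; omega) hInv0
  simp only [jstep, hget0, hrun]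
  have hjft : jf < t := border_lt cs hInv.1
  by_cases hc : PySem.List.pyGetD cs (t : Int) ' ' = PySem.List.pyGetD cs (jf : Int) ' '
  · rw [if_pos hc]
    rw [PySem.List.pyGetD_natCast, PySem.List.pyGetD_natCast] at hc
    have hM : M cs (t + 1) = jf + 1 := by
      unfold M
      rw [Nat.findGreatest_eq_iff]
      refine ⟨by omega, fun _ => (border_succ cs t jf).mpr ⟨hInv.1, hc⟩, ?_⟩
      intro k hgt hle hP
      rcases k with _ | k'
      · omega
      · obtain ⟨hb, hcc⟩ := (border_succ cs t k').mp hP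
        exact hInv.2 k' hb (by omega) hcc
    rw [hM]
    push_cast
    ring
  · rw [if_neg hc]
    rcases hflag with h0 | heq
    · subst h0
      have hM : M cs (t + 1) = 0 := by
        unfold M
        rw [Nat.findGreatest_eq_iff]
        refine ⟨by omega, by omega, ?_⟩
        intro k hgt hle hP
        rcases k with _ | k'
        · omega
        · obtain ⟨hb, hcc⟩ := (border_succ cs t k').mp hP
          rcases Nat.eq_zero_or_pos k' with hz | hpos
          · subst hz
            rw [PySem.List.pyGetD_natCast, PySem.List.pyGetD_natCast] at hc
            exact hc hcc
          · exact hInv.2 k' hb hpos hcc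
      rw [hM]
    · exfalso
      rw [PySem.List.pyGetD_natCast, PySem.List.pyGetD_natCast] at hc
      exact hc heq

-- the list-building view of prefix_function's fold (appends instead of in-place set)
def buildK (cs : List Char) : List Int → List Int → List Int
  | pi, [] => pi
  | pi, i :: rest => buildK cs (pi ++ [jstep cs pi i]) rest

-- bounds invariant needed to relate the in-place fold to buildK
def fmnInv (pi : List Int) : Prop := ∀ t (ht : t < pi.length), 0 ≤ pi[t] ∧ pi[t] ≤ (t : Int)

lemma chase_bounds (cs : List Char) (c : Char) :
    ∀ (fuel : Nat) (pi : List Int) (j : Int), fmnInv pi → 0 ≤ j → j ≤ (pi.length : Int) →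
      0 ≤ borderChase cs pi c fuel j ∧ borderChase cs pi c fuel j ≤ j := by
  intro fuel
  induction fuel with
  | zero => intro pi j _ h0 _; simp [borderChase]; exact h0
  | succ f ih =>
    intro pi j hInv h0 hj
    simp only [borderChase]
    split
    · rename_i hcond
      have hjpos : 0 < j := hcond.1
      have hidx : (j - 1).toNat < pi.length := by omega
      have hget : PySem.List.pyGetD pi (j - 1) 0 = pi[(j - 1).toNat] :=
        PySem.List.pyGetD_eq_getElem pi 0 (by omega) (by omega)
      have hb := hInv (j - 1).toNat hidx
      have := ih pi (PySem.List.pyGetD pi (j - 1) 0) hInv (by rw [hget]; exact hb.1)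
        (by rw [hget]; omega)
      exact ⟨this.1, by omega⟩
    · exact ⟨h0, le_refl _⟩

lemma chase_pad (cs : List Char) (c : Char) :
    ∀ (fuel : Nat) (pi zs : List Int) (j : Int), fmnInv pi → 0 ≤ j → j ≤ (pi.length : Int) →
      borderChase cs (pi ++ zs) c fuel j = borderChase cs pi c fuel j := by
  intro fuel
  induction fuel with
  | zero => intro pi zs j _ _ _; simp [borderChase]
  | succ f ih =>
    intro pi zs j hInv h0 hj
    simp only [borderChase]
    split
    · rename_i hcond
      have hjpos : 0 < j := hcond.1
      have hidx : (j - 1).toNat < pi.length := by omega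
      have hget : PySem.List.pyGetD pi (j - 1) 0 = pi[(j - 1).toNat] :=
        PySem.List.pyGetD_eq_getElem pi 0 (by omega) (by omega)
      have hget2 : PySem.List.pyGetD (pi ++ zs) (j - 1) 0 = pi[(j - 1).toNat] := by
        rw [PySem.List.pyGetD_eq_getElem (pi ++ zs) 0 (by omega)
          (by simp; omega)]
        exact List.getElem_append_left hidx
      have hb := hInv (j - 1).toNat hidx
      rw [hget2, ← hget]
      rw [ih pi zs _ hInv (by rw [hget]; exact hb.1) (by rw [hget]; omega)]
    · rfl

lemma jstep_bounds (cs : List Char) (pi : List Int) (h1 : 1 ≤ pi.length) (hInv : fmnInv pi) :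
    0 ≤ jstep cs pi (pi.length : Int) ∧ jstep cs pi (pi.length : Int) ≤ (pi.length : Int) := by
  unfold jstep
  have hget : PySem.List.pyGetD pi ((pi.length : Int) - 1) 0 = pi[pi.length - 1] := by
    rw [PySem.List.pyGetD_eq_getElem pi 0 (by omega) (by omega)]
    congr 1; omega
  have hb := hInv (pi.length - 1) (by omega)
  have hc := chase_bounds cs (PySem.List.pyGetD cs (pi.length : Int) ' ') cs.length pi
    (PySem.List.pyGetD pi ((pi.length : Int) - 1) 0) hInv (by rw [hget]; exact hb.1)
    (by rw [hget]; omega)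
  have hup : ((pi.length - 1 : Nat) : Int) = (pi.length : Int) - 1 := by omega
  simp only []
  rw [hget] at hc ⊢
  rw [hup] at hb
  split <;> omega

lemma jstep_pad (cs : List Char) (pi zs : List Int) (h1 : 1 ≤ pi.length) (hInv : fmnInv pi) :
    jstep cs (pi ++ zs) (pi.length : Int) = jstep cs pi (pi.length : Int) := by
  unfold jstep
  simp only []
  have hget : PySem.List.pyGetD pi ((pi.length : Int) - 1) 0 = pi[pi.length - 1] := by
    rw [PySem.List.pyGetD_eq_getElem pi 0 (by omega) (by omega)]
    congr 1; omega
  have hget2 : PySem.List.pyGetD (pi ++ zs) ((pi.length : Int) - 1) 0 = pi[pi.length - 1] := by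
    rw [PySem.List.pyGetD_eq_getElem (pi ++ zs) 0 (by omega) (by simp only [List.length_append]; push_cast; omega)]
    have : ((pi.length : Int) - 1).toNat < pi.length := by omega
    rw [List.getElem_append_left this]
    congr 1
    omega
  have hb := hInv (pi.length - 1) (by omega)
  have hup : ((pi.length - 1 : Nat) : Int) = (pi.length : Int) - 1 := by omega
  rw [hget, hget2]
  rw [chase_pad cs _ cs.length pi zs _ hInv hb.1 (by omega)]

lemma fmnInv_append (pi : List Int) (j : Int) (hInv : fmnInv pi) (h0 : 0 ≤ j)
    (hj : j ≤ (pi.length : Int)) : fmnInv (pi ++ [j]) := by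
  intro t ht
  simp only [List.length_append, List.length_cons, List.length_nil] at ht
  by_cases h : t < pi.length
  · rw [List.getElem_append_left h]; exact hInv t h
  · have : t = pi.length := by omega
    subst this
    rw [List.getElem_append_right (le_refl _)]
    simp
    omega

lemma stepA_pad (cs : List Char) (pi : List Int) (k : Nat) (h1 : 1 ≤ pi.length) (hk : 1 ≤ k)
    (hInv : fmnInv pi) :
    stepA cs (pi ++ List.replicate k 0) (pi.length : Int) =
      (pi ++ [jstep cs pi (pi.length : Int)]) ++ List.replicate (k - 1) 0 := by
  have hstep : stepA cs (pi ++ List.replicate k 0) (pi.length : Int) =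
      PySem.List.pySetD (pi ++ List.replicate k 0) (pi.length : Int)
        (jstep cs (pi ++ List.replicate k 0) (pi.length : Int)) := rfl
  rw [hstep, jstep_pad cs pi _ h1 hInv]
  rw [PySem.List.pySetD_natCast]
  obtain ⟨k', rfl⟩ : ∃ k', k = k' + 1 := ⟨k - 1, by omega⟩
  rw [List.replicate_succ]
  rw [List.set_append_right _ _ (le_refl _)]
  simp

lemma foldA_eq_buildK (cs : List Char) (n : Nat) :
    ∀ (k : Nat) (pi : List Int), fmnInv pi → 1 ≤ pi.length → pi.length + k = n →
      (PySem.List.pyRange (pi.length : Int) (n : Int) 1).foldl (stepA cs)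
          (pi ++ List.replicate k 0) =
        buildK cs pi (PySem.List.pyRange (pi.length : Int) (n : Int) 1) := by
  intro k
  induction k with
  | zero =>
    intro pi _ _ h
    rw [PySem.List.pyRange_one_eq_nil (by omega)]
    simp [buildK]
  | succ k' ih =>
    intro pi hInv h1 h
    rw [PySem.List.pyRange_one_cons (by omega)]
    simp only [List.foldl_cons, buildK]
    rw [stepA_pad cs pi (k' + 1) h1 (by omega) hInv]
    have hb := jstep_bounds cs pi h1 hInv
    have hInv' := fmnInv_append pi _ hInv hb.1 hb.2
    have hlen : (pi ++ [jstep cs pi (pi.length : Int)]).length = pi.length + 1 := by simp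
    have := ih (pi ++ [jstep cs pi (pi.length : Int)]) hInv' (by omega) (by omega)
    rw [hlen] at this
    simp only [Nat.add_sub_cancel]
    have hcast : ((pi.length + 1 : Nat) : Int) = (pi.length : Int) + 1 := by push_cast; ring
    rw [hcast] at this
    exact this

lemma fmnInv_init : fmnInv [0] := by
  intro t ht
  simp only [List.length_cons, List.length_nil] at ht
  interval_cases t
  simp

-- the prefix-function list is exactly the longest-border function M
lemma buildK_encodes (cs : List Char) (n : Nat) (hn : n = cs.length) :
    ∀ (k : Nat) (pi : List Int), 1 ≤ pi.length → pi.length + k = n →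
      pi = (List.range pi.length).map (fun u => (M cs (u + 1) : Int)) →
      buildK cs pi (PySem.List.pyRange (pi.length : Int) (n : Int) 1) =
        (List.range n).map (fun u => (M cs (u + 1) : Int)) := by
  intro k
  induction k with
  | zero =>
    intro pi h1 hlen hform
    rw [PySem.List.pyRange_one_eq_nil (by omega)]
    have hpn : pi.length = n := by omega
    rw [buildK, hform, hpn]
  | succ k' ih =>
    intro pi h1 hlen hform
    rw [PySem.List.pyRange_one_cons (by omega)]
    rw [buildK]
    have hpi : ∀ u (hu : u < pi.length), pi[u] = (M cs (u + 1) : Int) := by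
      intro u hu
      have h := List.getElem_of_eq hform hu
      simpa using h
    have hj : jstep cs pi (pi.length : Int) = (M cs (pi.length + 1) : Int) :=
      jstep_M cs pi pi.length h1 (by omega) (le_refl _) hpi
    have hform' : pi ++ [jstep cs pi (pi.length : Int)] =
        (List.range (pi.length + 1)).map (fun u => (M cs (u + 1) : Int)) := by
      rw [List.range_succ, List.map_append, ← hform, hj]
      simp
    have hlen2 : (pi ++ [jstep cs pi (pi.length : Int)]).length = pi.length + 1 := by simp
    have hform'' : pi ++ [jstep cs pi (pi.length : Int)] =
        (List.range ((pi ++ [jstep cs pi (pi.length : Int)]).length)).map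
          (fun u => (M cs (u + 1) : Int)) := by
      rw [hlen2]; exact hform'
    have := ih (pi ++ [jstep cs pi (pi.length : Int)]) (by simp) (by simp; omega) hform''
    rw [hlen2] at this
    have hcast : ((pi.length + 1 : Nat) : Int) = (pi.length : Int) + 1 := by push_cast; ring
    rw [hcast] at this
    exact this

-- B's period test is a border test
lemma periodTest_iff (cs : List Char) (p L : Nat) (hp : 1 ≤ p) (hpL : p ≤ L) :
    periodTest cs (p : Int) (L : Int) = true ↔ borderB cs L (L - p) = true := by
  unfold periodTest
  rw [List.all_eq_true, borderB_iff]
  constructor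
  · intro h
    refine ⟨by omega, fun x hx => ?_⟩
    have hmem : ((p + x : Nat) : Int) ∈ PySem.List.pyRange (p : Int) (L : Int) 1 := by
      rw [PySem.List.mem_pyRange_one]
      constructor <;> [push_cast; push_cast] <;> omega
    have h2 := h _ hmem
    have e1 : ((p + x : Nat) : Int) - (p : Int) = ((x : Nat) : Int) := by push_cast; ring
    rw [e1, PySem.List.pyGetD_natCast, PySem.List.pyGetD_natCast, beq_iff_eq] at h2
    have e2 : L - (L - p) + x = p + x := by omega
    rw [e2]
    exact h2.symm
  · intro h j hj
    obtain ⟨hlt, hb⟩ := h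
    rw [PySem.List.mem_pyRange_one] at hj
    obtain ⟨hj1, hj2⟩ := hj
    have hx : (j - (p : Int)).toNat < L - p := by omega
    set x := (j - (p : Int)).toNat with hxdef
    have h2 := hb x hx
    have e2 : L - (L - p) + x = p + x := by omega
    rw [e2] at h2
    have e4 : j - (p : Int) = ((x : Nat) : Int) := by omega
    have e3 : j = ((p + x : Nat) : Int) := by push_cast; omega
    rw [e4, e3, PySem.List.pyGetD_natCast, PySem.List.pyGetD_natCast, beq_iff_eq]
    exact h2.symm

-- the smallest period of the prefix of length L is L - M L
lemma periodTest_sp (cs : List Char) (L : Nat) (hL : 1 ≤ L) :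
    periodTest cs ((L - M cs L : Nat) : Int) (L : Int) = true := by
  have hM := M_lt cs L hL
  rw [periodTest_iff cs (L - M cs L) L (by omega) (by omega)]
  have e1 : L - (L - M cs L) = M cs L := by omega
  rw [e1]
  exact M_border cs L hL

lemma periodTest_lt_sp (cs : List Char) (L p : Nat) (hp : 1 ≤ p) (hlt : p < L - M cs L) :
    periodTest cs (p : Int) (L : Int) = false := by
  rcases Bool.eq_false_or_eq_true (periodTest cs (p : Int) (L : Int)) with h | h
  · exfalso
    have hb := (periodTest_iff cs p L hp (by omega)).mp h
    have := M_greatest cs hb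
    omega
  · exact h

-- a border shrinks by one when the last character is dropped
lemma sp_mono (cs : List Char) (L : Nat) (hL : 1 ≤ L) :
    L - M cs L ≤ (L + 1) - M cs (L + 1) := by
  rcases Nat.eq_zero_or_pos (M cs (L + 1)) with h0 | hpos
  · have := M_lt cs L hL
    omega
  · have hb := M_border cs (L + 1) (by omega)
    rw [borderB_iff] at hb
    obtain ⟨hlt, hp⟩ := hb
    have hb' : borderB cs L (M cs (L + 1) - 1) = true := by
      rw [borderB_iff]
      refine ⟨by omega, fun x hx => ?_⟩
      have := hp x (by omega)
      have e1 : L + 1 - M cs (L + 1) + x = L - (M cs (L + 1) - 1) + x := by omega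
      rwa [e1] at this
    have := M_greatest cs hb'
    omega

-- the period test of the extended prefix only needs one further comparison
lemma periodSplit (cs : List Char) (p L : Nat) (_hp : 1 ≤ p) (hpL : p < L) :
    periodTest cs (p : Int) (L : Int) =
      (periodTest cs (p : Int) ((L : Int) - 1) &&
        (PySem.List.pyGetD cs ((L : Int) - 1) ' ' ==
          PySem.List.pyGetD cs ((L : Int) - 1 - (p : Int)) ' ')) := by
  unfold periodTest
  have e0 : PySem.List.pyRange (p : Int) (L : Int) 1 =
      PySem.List.pyRange (p : Int) ((L : Int) - 1) 1 ++
        PySem.List.pyRange ((L : Int) - 1) (L : Int) 1 :=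
    PySem.List.pyRange_one_append _ _ _ (by omega) (by omega)
  have e1 : PySem.List.pyRange ((L : Int) - 1) (L : Int) 1 = [(L : Int) - 1] := by
    have := PySem.List.pyRange_one_singleton ((L : Int) - 1)
    have e2 : (L : Int) - 1 + 1 = (L : Int) := by ring
    rwa [e2] at this
  rw [e0, e1, List.all_append]
  simp

-- the while loop advances p exactly to the smallest period of the prefix of length L
lemma whileB_eq (cs : List Char) (L : Nat) (hL : 1 ≤ L) :
    ∀ (f p0 : Nat), 1 ≤ p0 → p0 ≤ L - M cs L → L - M cs L - p0 ≤ f →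
      whileB cs (L : Int) f (p0 : Int) (periodTest cs (p0 : Int) (L : Int)) =
        (((L - M cs L : Nat) : Int), true) := by
  intro f
  induction f with
  | zero =>
    intro p0 h1 h2 h3
    have hsp : p0 = L - M cs L := by omega
    subst hsp
    rw [periodTest_sp cs L hL]
    rfl
  | succ f ih =>
    intro p0 h1 h2 h3
    rcases Nat.lt_or_ge p0 (L - M cs L) with hlt | hge
    · rw [periodTest_lt_sp cs L p0 h1 hlt]
      rw [whileB]
      rw [if_pos rfl]
      have ecast : (p0 : Int) + 1 = ((p0 + 1 : Nat) : Int) := by push_cast; ring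
      rw [ecast]
      exact ih (p0 + 1) (by omega) (by omega) (by omega)
    · have hsp : p0 = L - M cs L := by omega
      subst hsp
      rw [periodTest_sp cs L hL]
      rw [whileB]
      rw [if_neg (by simp)]

-- the two outer loops agree step by step
-- the two outer loops agree step by step
lemma scan_eq_outer (s : String) (cs : List Char) (_hcs : cs = s.toList) (n : Nat)
    (hn : n = cs.length) (PI : List Int)
    (hPI : PI = (List.range n).map (fun u => (M cs (u + 1) : Int))) :
    ∀ (k i : Nat), 1 ≤ i → i + k = n →
      fmnScan s PI (n : Int) (PySem.List.pyRange (i : Int) (n : Int) 1) =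
        outerB s cs (n : Int) ((i - M cs i : Nat) : Int) true
          (PySem.List.pyRange ((i : Int) + 1) ((n : Int) + 1) 1) := by
  intro k
  induction k with
  | zero =>
    intro i h1 hik
    have hin : i = n := by omega
    subst hin
    rw [PySem.List.pyRange_one_eq_nil (le_refl _), PySem.List.pyRange_one_eq_nil (le_refl _)]
    simp only [fmnScan, outerB]
  | succ k' ih =>
    intro i h1 hik
    have hin : i < n := by omega
    have hMi := M_lt cs i h1
    have hMi1 := M_lt cs (i + 1) (by omega)
    have hmono := sp_mono cs i h1
    rw [PySem.List.pyRange_one_cons (by exact_mod_cast hin)]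
    rw [PySem.List.pyRange_one_cons (by exact_mod_cast (show i + 1 < n + 1 by omega) : ((i : Int) + 1) < (n : Int) + 1)]
    simp only [fmnScan, outerB]
    have hK : PySem.List.pyGetD PI (i : Int) 0 = (M cs (i + 1) : Int) := by
      rw [PySem.List.pyGetD_natCast, hPI]
      rw [List.getD_eq_getElem _ _ (by simp; omega)]
      simp
    rw [hK]
    -- normalise the indices L-1 and L-1-p of the incremental character test
    have h1eq : (i : Int) + 1 - 1 = (i : Int) := by ring
    rw [h1eq]
    -- the carried flag is exactly the period test at length i+1
    have hsplit := periodSplit cs (i - M cs i) (i + 1) (by omega) (by omega)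
    have ec1 : ((i + 1 : Nat) : Int) = (i : Int) + 1 := by push_cast; ring
    rw [ec1, h1eq, periodTest_sp cs i h1] at hsplit
    rw [← hsplit]
    -- run the while loop to the smallest period of the prefix of length i+1
    have hwhile := whileB_eq cs (i + 1) (by omega)
      (((i : Int) + 1 - ((i - M cs i : Nat) : Int)).toNat) (i - M cs i)
      (by omega) (by omega) (by omega)
    rw [ec1] at hwhile
    rw [hwhile]
    have hdiv : (((i + 1) - M cs (i + 1) : Nat) : Int) = (i : Int) + 1 - (M cs (i + 1) : Int) := by
      omega
    simp only [hdiv]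
    by_cases hcond : 0 < M cs (i + 1) ∧
        PySem.Int.mod ((i : Int) + 1) ((i : Int) + 1 - (M cs (i + 1) : Int)) = 0
    · rw [if_pos (show (0 : Int) < (M cs (i + 1) : Int) ∧
          PySem.Int.mod ((i : Int) + 1) ((i : Int) + 1 - (M cs (i + 1) : Int)) = 0 from
          ⟨by exact_mod_cast hcond.1, hcond.2⟩),
        if_pos (show ((i : Int) + 1 - (M cs (i + 1) : Int), true).1 < (i : Int) + 1 ∧
          PySem.Int.mod ((i : Int) + 1) ((i : Int) + 1 - (M cs (i + 1) : Int), true).1 = 0 from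
          ⟨by simp; exact_mod_cast hcond.1, hcond.2⟩)]
      by_cases hisin : PySem.Str.isIn (PySem.Int.toStr
          (PySem.Int.floordiv ((i : Int) + 1) ((i : Int) + 1 - (M cs (i + 1) : Int)))) s = false
      · rw [if_pos hisin, if_pos hisin]
      · rw [if_neg hisin, if_neg hisin]
        have := ih (i + 1) (by omega) (by omega)
        rw [ec1, hdiv] at this
        exact this
    · rw [if_neg (show ¬((0 : Int) < (M cs (i + 1) : Int) ∧
          PySem.Int.mod ((i : Int) + 1) ((i : Int) + 1 - (M cs (i + 1) : Int)) = 0) from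
          fun h => hcond ⟨by exact_mod_cast h.1, h.2⟩),
        if_neg (show ¬(((i : Int) + 1 - (M cs (i + 1) : Int), true).1 < (i : Int) + 1 ∧
          PySem.Int.mod ((i : Int) + 1) ((i : Int) + 1 - (M cs (i + 1) : Int), true).1 = 0) from
          fun h => hcond ⟨by have := h.1; simp at this; exact_mod_cast this, h.2⟩)]
      have := ih (i + 1) (by omega) (by omega)
      rw [ec1, hdiv] at this
      exact this

-- ===== VERDICT (by name: the statement is the Claim_ definition above) =====
theorem find_missing_number_spec : Claim_equal_find_missing_number := by
  intro s _
  unfold Spec_find_missing_number find_missing_number find_missing_number_alt prefix_function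
  simp only []
  by_cases h0 : s.toList.length = 0
  · rw [h0]
    rw [PySem.List.pyRange_one_eq_nil (by norm_num), PySem.List.pyRange_one_eq_nil (by norm_num)]
    simp only [fmnScan]
    norm_num
    rfl
  · have h1 : 1 ≤ s.toList.length := by omega
    set cs := s.toList with hcs
    set n := cs.length with hn
    have hfold : (PySem.List.pyRange 1 (n : Int) 1).foldl (stepA cs) (List.replicate n 0) =
        buildK cs [0] (PySem.List.pyRange 1 (n : Int) 1) := by
      have hrep : List.replicate n 0 = ([0] : List Int) ++ List.replicate (n - 1) 0 := by
        have : n = (n - 1) + 1 := by omega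
        rw [this]
        simp [List.replicate_succ]
      rw [hrep]
      have := foldA_eq_buildK cs n (n - 1) [0] fmnInv_init (by simp) (by simp; omega)
      simpa using this
    have hPI : buildK cs [0] (PySem.List.pyRange 1 (n : Int) 1) =
        (List.range n).map (fun u => (M cs (u + 1) : Int)) := by
      have hseed : ([0] : List Int) =
          (List.range (List.length ([0] : List Int))).map (fun u => (M cs (u + 1) : Int)) := by
        simp [M_one]
      have := buildK_encodes cs n hn (n - 1) [0] (by simp) (by simp; omega) hseed
      simpa using this
    rw [hfold, hPI]
    have hcons : PySem.List.pyRange 0 (n : Int) 1 = 0 :: PySem.List.pyRange 1 (n : Int) 1 := by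
      have := PySem.List.pyRange_one_cons (a := 0) (b := (n : Int)) (by exact_mod_cast h1)
      simpa using this
    rw [hcons, fmnScan]
    have hk0 : PySem.List.pyGetD ((List.range n).map (fun u => (M cs (u + 1) : Int))) 0 0 = 0 := by
      have hz : (0 : Int) = ((0 : Nat) : Int) := rfl
      rw [hz, PySem.List.pyGetD_natCast]
      rw [List.getD_eq_getElem _ _ (by simp; omega)]
      simp [M_one]
    rw [hk0]
    rw [if_neg (by norm_num)]
    have := scan_eq_outer s cs hcs n hn
      ((List.range n).map (fun u => (M cs (u + 1) : Int))) rfl (n - 1) 1 (le_refl _) (by omega)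
    norm_num [M_one] at this
    exact this
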